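-- pv_equiv track=rewrite | github.com/wwd9135/completed-projects | Mini_Projects/CLI_tool.py | character_type
-- ===== SOURCE A (Python) =====
-- import string
--
-- def character_type(pw):
--     has_lower = any(c.islower() for c in pw)
--     has_upper = any(c.isupper() for c in pw)
--     has_digit = any(c.isdigit() for c in pw)
--     has_symbol = any(c in string.punctuation for c in pw)
--
--     types = sum([has_lower, has_upper, has_digit, has_symbol])
--
--     if types >= 2:
--         return None
--     return "Error: password must contain 2 or more character types"
-- ===== SOURCE B (Python) =====
-- import string
--
-- def character_type(pw):
--     has_lower = has_upper = has_digit = has_symbol = False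
--     for c in pw:
--         if c.islower():
--             has_lower = True
--         elif c.isupper():
--             has_upper = True
--         elif c.isdigit():
--             has_digit = True
--         elif c in string.punctuation:
--             has_symbol = True
--     if has_lower + has_upper + has_digit + has_symbol >= 2:
--         return None
--     return "Error: password must contain 2 or more character types"
-- ===== Notes on version B (the rewrite author's own statement) =====
-- stated objective: faster
-- what changed: Replaces the four separate any()-scans over the password with a single loop that maintains four category flags (using elif, since the ASCII categories are disjoint) and then applies the same >=2 test.
import Mathlib
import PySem

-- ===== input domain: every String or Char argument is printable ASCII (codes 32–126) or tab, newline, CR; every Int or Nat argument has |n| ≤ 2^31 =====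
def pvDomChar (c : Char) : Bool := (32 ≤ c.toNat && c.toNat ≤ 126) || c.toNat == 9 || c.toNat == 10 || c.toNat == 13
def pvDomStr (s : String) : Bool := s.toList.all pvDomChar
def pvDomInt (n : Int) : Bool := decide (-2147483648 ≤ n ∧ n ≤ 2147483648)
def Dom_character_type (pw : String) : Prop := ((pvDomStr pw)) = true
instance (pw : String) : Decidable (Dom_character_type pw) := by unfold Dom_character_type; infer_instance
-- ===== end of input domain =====

-- B replaces A's four separate any() scans with one loop maintaining four flags (objective: faster — one pass instead of four scans).

-- string.punctuation, as a list of its characters (exact: the 32 ASCII punctuation characters)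
def pyPunctuation : List Char :=
  ['!', '"', '#', '$', '%', '&', '\'', '(', ')', '*', '+', ',', '-', '.', '/',
   ':', ';', '<', '=', '>', '?', '@', '[', '\\', ']', '^', '_', '`', '{', '|', '}', '~']

-- ===== PORT A =====
def character_type (pw : String) : Option String :=
  let has_lower := pw.toList.any (fun c => PySem.Chars.islower c)
  let has_upper := pw.toList.any (fun c => PySem.Chars.isupper c)
  let has_digit := pw.toList.any (fun c => PySem.Chars.isdigit c)
  let has_symbol := pw.toList.any (fun c => pyPunctuation.contains c)
  let types : Nat := (if has_lower then 1 else 0) + (if has_upper then 1 else 0)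
    + (if has_digit then 1 else 0) + (if has_symbol then 1 else 0)
  if types ≥ 2 then none
  else some "Error: password must contain 2 or more character types"

-- ===== PORT B =====
-- B's single for-loop over the characters, carrying the four flags
def ctLoop : List Char → Bool × Bool × Bool × Bool → Bool × Bool × Bool × Bool
  | [], st => st
  | c :: rest, (l, u, d, s) =>
    ctLoop rest
      (if PySem.Chars.islower c then (true, u, d, s)
       else if PySem.Chars.isupper c then (l, true, d, s)
       else if PySem.Chars.isdigit c then (l, u, true, s)
       else if pyPunctuation.contains c then (l, u, d, true)
       else (l, u, d, s))

def character_type_alt (pw : String) : Option String :=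
  let st := ctLoop pw.toList (false, false, false, false)
  let types : Nat := (if st.1 then 1 else 0) + (if st.2.1 then 1 else 0)
    + (if st.2.2.1 then 1 else 0) + (if st.2.2.2 then 1 else 0)
  if types ≥ 2 then none
  else some "Error: password must contain 2 or more character types"

-- ===== PRECONDITION & SPEC =====
def Spec_character_type (pw : String) (out : Option String) : Prop := out = character_type_alt pw
instance (pw : String) (out : Option String) : Decidable (Spec_character_type pw out) := by unfold Spec_character_type; infer_instance

-- ===== CLAIM (what is proved, stated in full; the proofs are below) =====
def Claim_equal_character_type : Prop := ∀ (pw : String), Dom_character_type pw → Spec_character_type pw (character_type pw)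

-- ===== LEMMAS AND PROOFS =====

theorem punct_flags (c : Char) (h : pyPunctuation.contains c = true) :
    PySem.Chars.islower c = false ∧ PySem.Chars.isupper c = false ∧
      PySem.Chars.isdigit c = false := by
  have hm : c ∈ pyPunctuation := by simpa using h
  fin_cases hm <;> decide

theorem lower_not_upper (c : Char) (h : PySem.Chars.islower c = true) :
    PySem.Chars.isupper c = false := by
  simp [PySem.Chars.islower, PySem.Chars.isupper, Char.le_def, UInt32.le_iff_toNat_le, UInt32.lt_iff_toNat_lt] at h ⊢
  omega

theorem lower_not_digit (c : Char) (h : PySem.Chars.islower c = true) :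
    PySem.Chars.isdigit c = false := by
  simp [PySem.Chars.islower, PySem.Chars.isdigit, Char.le_def, UInt32.le_iff_toNat_le, UInt32.lt_iff_toNat_lt] at h ⊢
  omega

theorem upper_not_digit (c : Char) (h : PySem.Chars.isupper c = true) :
    PySem.Chars.isdigit c = false := by
  simp [PySem.Chars.isupper, PySem.Chars.isdigit, Char.le_def, UInt32.le_iff_toNat_le, UInt32.lt_iff_toNat_lt] at h ⊢
  omega

theorem lower_not_punct (c : Char) (h : PySem.Chars.islower c = true) :
    pyPunctuation.contains c = false := by
  by_contra hc
  exact absurd h (by simp [(punct_flags c (by simpa using hc)).1])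

theorem upper_not_punct (c : Char) (h : PySem.Chars.isupper c = true) :
    pyPunctuation.contains c = false := by
  by_contra hc
  exact absurd h (by simp [(punct_flags c (by simpa using hc)).2.1])

theorem digit_not_punct (c : Char) (h : PySem.Chars.isdigit c = true) :
    pyPunctuation.contains c = false := by
  by_contra hc
  exact absurd h (by simp [(punct_flags c (by simpa using hc)).2.2])

theorem ctLoop_eq (cs : List Char) (l u d s : Bool) :
    ctLoop cs (l, u, d, s) =
      (l || cs.any (fun c => PySem.Chars.islower c),
       u || cs.any (fun c => PySem.Chars.isupper c),
       d || cs.any (fun c => PySem.Chars.isdigit c),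
       s || cs.any (fun c => pyPunctuation.contains c)) := by
  induction cs generalizing l u d s with
  | nil => simp [ctLoop]
  | cons c cs ih =>
    simp only [ctLoop, List.any_cons]
    by_cases hl : PySem.Chars.islower c = true
    · have hnp : c ∉ pyPunctuation := by simpa using lower_not_punct c hl
      simp [hl, ih, lower_not_upper c hl, lower_not_digit c hl, hnp]
    · by_cases hu : PySem.Chars.isupper c = true
      · have hnp : c ∉ pyPunctuation := by simpa using upper_not_punct c hu
        simp [hl, hu, ih, upper_not_digit c hu, hnp]
      · by_cases hd : PySem.Chars.isdigit c = true
        · have hnp : c ∉ pyPunctuation := by simpa using digit_not_punct c hd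
          simp [hl, hu, hd, ih, hnp]
        · by_cases hp : pyPunctuation.contains c = true
          · have hm : c ∈ pyPunctuation := by simpa using hp
            simp [hl, hu, hd, ih, hm]
          · have hnp : c ∉ pyPunctuation := by simpa using hp
            simp [hl, hu, hd, ih, hnp]

-- ===== VERDICT (by name: the statement is the Claim_ definition above) =====
theorem character_type_spec : Claim_equal_character_type := by
  intro pw _
  unfold Spec_character_type character_type character_type_alt
  rw [ctLoop_eq]
  simp
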